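-- pv_equiv track=rewrite | github.com/NSChristopher/Minigrid_with_Sprites | minigrid/utils/rendering.py | find_nearest_neighbor
-- ===== SOURCE A (Python) =====
-- def find_nearest_neighbor(proximity_grid, Keys):
--     max_matches = -1
--     best_match = Keys[0]
--     for key in Keys:
--         matches = sum([1 for i, j in zip(proximity_grid, key) if i == j])
--         if matches > max_matches:
--             max_matches = matches
--             best_match = key
--     return best_match
-- ===== SOURCE B (Python) =====
-- def find_nearest_neighbor(proximity_grid, Keys):
--     scores = [sum([1 for i, j in zip(proximity_grid, key) if i == j]) for key in Keys]
--     return Keys[scores.index(max(scores))]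
-- ===== Notes on version B (the rewrite author's own statement) =====
-- stated objective: alternative
-- what changed: A interleaves scoring with a running best-so-far update in one loop over Keys; B stages the work into two differently-shaped passes: it first materialises the whole score table, then takes max(scores) and first-index-of-max over that table, which reproduces A's first-win tie-break.
import Mathlib
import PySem

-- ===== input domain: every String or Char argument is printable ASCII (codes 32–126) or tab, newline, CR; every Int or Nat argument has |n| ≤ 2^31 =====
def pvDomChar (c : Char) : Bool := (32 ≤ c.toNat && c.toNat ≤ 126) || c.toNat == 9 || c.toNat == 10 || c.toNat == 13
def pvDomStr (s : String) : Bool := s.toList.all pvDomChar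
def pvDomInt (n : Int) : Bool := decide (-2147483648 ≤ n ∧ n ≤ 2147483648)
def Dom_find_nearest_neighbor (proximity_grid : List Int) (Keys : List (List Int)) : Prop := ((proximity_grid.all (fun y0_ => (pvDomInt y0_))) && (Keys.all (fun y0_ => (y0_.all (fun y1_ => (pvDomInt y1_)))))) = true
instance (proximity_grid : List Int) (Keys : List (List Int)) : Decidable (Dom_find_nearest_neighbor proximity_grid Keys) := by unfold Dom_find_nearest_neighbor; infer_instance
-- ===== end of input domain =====

-- B stages A's single running-max loop into two passes: build the full score table, then
-- first-index-of-max over the table (same cost; objective: alternative decomposition).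

-- ===== PORT A =====
def find_nearest_neighbor (proximity_grid : List Int) (Keys : List (List Int)) : List Int :=
  -- max_matches = -1; best_match = Keys[0] (IndexError on empty Keys: excluded by Pre_)
  let st :=
    Keys.foldl
      (fun (st : Int × List Int) key =>
        let nmatch : Int :=
          (((proximity_grid.zip key).filter (fun p => p.1 == p.2)).map (fun _ => (1 : Int))).sum
        if st.1 < nmatch then (nmatch, key) else st)
      (-1, (PySem.List.pyGet? Keys 0).getD [])
  st.2

-- ===== PORT B =====
def find_nearest_neighbor_alt (proximity_grid : List Int) (Keys : List (List Int)) : List Int :=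
  let scores : List Int :=
    Keys.map (fun key =>
      (((proximity_grid.zip key).filter (fun p => p.1 == p.2)).map (fun _ => (1 : Int))).sum)
  -- max(scores) with no key; ValueError on empty Keys: excluded by Pre_
  match PySem.List.max? scores (fun y => y) with
  | none => []
  | some m =>
    -- scores.index(m) always succeeds since m ∈ scores; then Keys[that index]
    (PySem.List.pyGet? Keys (((PySem.List.index? scores m).getD 0 : Nat) : Int)).getD []

-- ===== PRECONDITION & SPEC =====
-- A raises IndexError (Keys[0]) and B raises ValueError (max of empty) on empty Keys; both are excluded.
def Pre_find_nearest_neighbor (proximity_grid : List Int) (Keys : List (List Int)) : Prop := Keys ≠ []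
instance (proximity_grid : List Int) (Keys : List (List Int)) : Decidable (Pre_find_nearest_neighbor proximity_grid Keys) := by unfold Pre_find_nearest_neighbor; infer_instance
def pvWitness_find_nearest_neighbor : List Int × List (List Int) := ([1, 2], [[1, 0], [1, 2]])

def Spec_find_nearest_neighbor (proximity_grid : List Int) (Keys : List (List Int)) (out : List Int) : Prop := out = find_nearest_neighbor_alt proximity_grid Keys
instance (proximity_grid : List Int) (Keys : List (List Int)) (out : List Int) : Decidable (Spec_find_nearest_neighbor proximity_grid Keys out) := by unfold Spec_find_nearest_neighbor; infer_instance

-- ===== CLAIM (what is proved, stated in full; the proofs are below) =====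
def Claim_equal_find_nearest_neighbor : Prop := ∀ (proximity_grid : List Int) (Keys : List (List Int)), Dom_find_nearest_neighbor proximity_grid Keys → Pre_find_nearest_neighbor proximity_grid Keys → Spec_find_nearest_neighbor proximity_grid Keys (find_nearest_neighbor proximity_grid Keys)

-- ===== LEMMAS AND PROOFS =====

-- A's running-max fold starting from (f b, b) picks (b :: t)[first index of the max of the scores]
theorem pv_main (f : List Int → Int) (t : List (List Int)) :
    ∀ b : List Int,
      (t.foldl
        (fun (st : Int × List Int) k => if st.1 < f k then (f k, k) else st)
        (f b, b)).2
      = (PySem.List.pyGet? (b :: t)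
          (((PySem.List.index? (f b :: t.map f) ((t.map f).foldl max (f b))).getD 0 : Nat) : Int)).getD [] := by
  induction t with
  | nil =>
    intro b
    simp only [List.map_nil, List.foldl_nil]
    rw [PySem.List.index?_cons_self]
    simp only [Option.getD_some, PySem.List.pyGet?_natCast, List.getElem?_cons_zero]
  | cons x t ih =>
    intro b
    by_cases h : f b < f x
    · have hmax : max (f b) (f x) = f x := max_eq_right (le_of_lt h)
      simp only [List.foldl_cons, if_pos h, List.map_cons, hmax]
      rw [ih x]
      -- the head score f b is strictly below the max, so index skips it
      have hle : f x ≤ (t.map f).foldl max (f x) := (PySem.List.le_foldl_max (t.map f) (f x)).1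
      have hne : f b ≠ (t.map f).foldl max (f x) := ne_of_lt (lt_of_lt_of_le h hle)
      have hmem : (t.map f).foldl max (f x) ∈ f x :: t.map f := by
        rcases PySem.List.foldl_max_mem (t.map f) (f x) with h1 | h1
        · rw [h1]; exact List.mem_cons_self
        · exact List.mem_cons_of_mem _ h1
      obtain ⟨j, hj⟩ := Option.isSome_iff_exists.mp
        ((PySem.List.index?_isSome_iff (f x :: t.map f) _).mpr hmem)
      rw [PySem.List.index?_cons_of_ne _ hne, hj]
      simp only [Option.map_some, Option.getD_some, PySem.List.pyGet?_natCast,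
        List.getElem?_cons_succ]
    · have hxb : f x ≤ f b := le_of_not_gt h
      have hmax : max (f b) (f x) = f b := max_eq_left hxb
      simp only [List.foldl_cons, if_neg h, List.map_cons, hmax]
      rw [ih b]
      by_cases hb : f b = (t.map f).foldl max (f b)
      · -- the max is already the head score: both indices are 0, both return b
        rw [← hb, PySem.List.index?_cons_self, PySem.List.index?_cons_self]
        simp only [Option.getD_some, PySem.List.pyGet?_natCast, List.getElem?_cons_zero]
      · have hle : f b ≤ (t.map f).foldl max (f b) := (PySem.List.le_foldl_max (t.map f) (f b)).1
        have hlt : f b < (t.map f).foldl max (f b) := lt_of_le_of_ne hle hb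
        have hxne : f x ≠ (t.map f).foldl max (f b) := ne_of_lt (lt_of_le_of_lt hxb hlt)
        have hmem : (t.map f).foldl max (f b) ∈ t.map f := by
          rcases PySem.List.foldl_max_mem (t.map f) (f b) with h1 | h1
          · exact absurd h1.symm hb
          · exact h1
        obtain ⟨j, hj⟩ := Option.isSome_iff_exists.mp
          ((PySem.List.index?_isSome_iff (t.map f) _).mpr hmem)
        rw [PySem.List.index?_cons_of_ne _ hb, PySem.List.index?_cons_of_ne _ hb,
            PySem.List.index?_cons_of_ne _ hxne, hj]
        simp only [Option.map_some, Option.getD_some, PySem.List.pyGet?_natCast,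
          List.getElem?_cons_succ]

-- ===== VERDICT (by name: the statement is the Claim_ definition above) =====
theorem find_nearest_neighbor_spec : Claim_equal_find_nearest_neighbor := by
  intro proximity_grid Keys _ hpre
  unfold Spec_find_nearest_neighbor find_nearest_neighbor find_nearest_neighbor_alt
  cases Keys with
  | nil => exact absurd rfl hpre
  | cons k0 rest =>
    have h0 : (PySem.List.pyGet? (k0 :: rest) 0).getD ([] : List Int) = k0 := by
      simp only [PySem.List.pyGet?, PySem.List.pyIdx?]
      norm_num
    set f : List Int → Int := fun key =>
      (((proximity_grid.zip key).filter (fun p => p.1 == p.2)).map (fun _ => (1 : Int))).sum with hf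
    have hnn : (0 : Int) ≤ f k0 := by
      show (0 : Int) ≤ (((proximity_grid.zip k0).filter (fun p => p.1 == p.2)).map (fun _ => (1 : Int))).sum
      rw [PySem.List.sum_map_const_int]
      exact mul_nonneg (Int.natCast_nonneg _) zero_le_one
    simp only [h0, List.foldl_cons, List.map_cons]
    rw [if_pos (lt_of_lt_of_le (by decide : (-1 : Int) < 0) hnn)]
    rw [pv_main f rest k0]
    rw [PySem.List.max?_id_cons]
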